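-- pv_equiv track=rewrite | github.com/ohdnf/algo-study | programmers/2019_kakao_blind_recruit/무지의먹방라이브/무지의먹방라이브_홍주표.py | solution
-- ===== SOURCE A (Python) =====
-- import heapq as hq
--
-- def solution(food_times, k):
--     """
--     1. 우선순위 큐 풀이 참고
--     https://www.youtube.com/watch?v=Rgw0fo6isUM&t=1036s
--     2. 파이썬에서는 PriorityQueue보다는 heapq를 사용하는 것이 더 빠르다고 합니다.
--     https://stackoverflow.com/questions/36991716/whats-the-difference-between-heapq-and-priorityqueue-in-python
--     """
--     if sum(food_times) <= k:
--         return -1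
--
--     # 우선순위 큐를 사용하여 제일 적은 음식 섭취 소요시간을 차례로 가져올 수 있게 합니다.
--     queue = []
--     for idx, time in enumerate(food_times):
--         hq.heappush(queue, (time, idx + 1))
--     remain, elapsed, before = len(queue), 0, 0
--     # 가장 적은 섭취 시간(queue[0][0])을 현재 남아있는 모든 음식의 수(remain)만큼 곱해 총 소요시간에 더할 수 있습니다.
--     # 이때 중복 계산을 피하기 위해 직전에 계산했던 섭취 시간(before)만큼을 빼줘야합니다.
--     while elapsed + remain * (queue[0][0] - before) <= k:
--         now, _ = hq.heappop(queue)
--         elapsed += remain * (now - before)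
--         remain -= 1
--         before = now
--     # loop를 벗어나고 남은 인덱스를 계산해줍니다.
--     queue = sorted(queue, key=lambda q: q[1])
--     return queue[(k - elapsed) % remain][1]
-- ===== SOURCE B (Python) =====
-- def solution(food_times, k):
--     # Binary search on the consumption level T (whole rounds per food):
--     # cost(T) = sum(min(t, T)) is monotone in T; find the largest T with cost(T) <= k,
--     # then the answer is the (k - cost(T))-th food (by index) among those with t > T.
--     n = len(food_times)
--     if sum(food_times) <= k:
--         return -1
--     def cost(T):
--         return sum(min(t, T) for t in food_times)
--     lo = min(k // n, min(food_times))
--     hi = max(food_times)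
--     while lo < hi:
--         mid = (lo + hi + 1) // 2
--         if cost(mid) <= k:
--             lo = mid
--         else:
--             hi = mid - 1
--     left = [i for i, t in enumerate(food_times, 1) if t > lo]
--     return left[k - cost(lo)]
-- ===== Notes on version B (the rewrite author's own statement) =====
-- stated objective: alternative
-- what changed: Replaces the heap simulation (heappush all items, pop loop maintaining remain/elapsed/before, then sort-and-modular-index into the leftovers) by a binary search on the consumption level T using the monotone cost function cost(T) = sum(min(t, T)); the answer is the (k - cost(T))-th food with t > T, with no heap, no sort and no modular arithmetic.
-- outside the precondition, e.g. on solution([], -1): A raises IndexError, B raises ZeroDivisionError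
import Mathlib
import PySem

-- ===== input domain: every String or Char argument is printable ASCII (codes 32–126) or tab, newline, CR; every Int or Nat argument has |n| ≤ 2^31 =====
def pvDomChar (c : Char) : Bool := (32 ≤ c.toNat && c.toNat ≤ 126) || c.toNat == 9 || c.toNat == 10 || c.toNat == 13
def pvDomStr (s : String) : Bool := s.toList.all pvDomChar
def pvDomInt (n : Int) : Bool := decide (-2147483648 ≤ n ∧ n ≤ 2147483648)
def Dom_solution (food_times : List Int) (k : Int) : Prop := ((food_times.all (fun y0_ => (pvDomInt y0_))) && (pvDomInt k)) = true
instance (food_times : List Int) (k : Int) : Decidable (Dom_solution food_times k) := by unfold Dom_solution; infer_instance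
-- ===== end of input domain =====

-- B replaces A's heap simulation by a binary search on the consumption level T
-- (cost(T) = Σ min(t,T) is monotone; the answer is the (k - cost(T))-th food with t > T)
-- (objective: alternative).  Equivalence is about the return value; neither program mutates its arguments.

-- ===== PORT A =====
-- heapq model: all heap elements are distinct (time, idx) pairs compared as Python tuples
-- (lexicographically), so heappop's result is the unique minimum and the final `sorted` depends only
-- on the heap's CONTENTS; the heap is therefore modeled observationally exactly by a lexicographically
-- sorted list: heappush = insert at the sorted position, heappop = pop the head, queue[0] = head.
def tupLt (a b : Int × Int) : Bool := decide (a.1 < b.1) || (!decide (b.1 < a.1) && decide (a.2 < b.2))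

-- the `while` loop; state (queue, remain, elapsed, before); after the loop A sorts by index and picks
def solutionLoop (k : Int) : List (Int × Int) → Int → Int → Int → Int
  | [], _, _, _ => 0   -- queue[0] raises IndexError in Python; unreachable under Pre_solution
  | (t, i) :: rest, remain, elapsed, before =>
    if elapsed + remain * (t - before) ≤ k then
      solutionLoop k rest (remain - 1) (elapsed + remain * (t - before)) t
    else
      ((PySem.List.pyGet? (PySem.List.sorted ((t, i) :: rest) (fun p => p.2))
          (PySem.Int.mod (k - elapsed) remain)).map (fun p => p.2)).getD 0

def solution (food_times : List Int) (k : Int) : Int :=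
  if food_times.sum ≤ k then -1
  else
    let queue := (PySem.List.enumerate food_times).foldl
      (fun q p => PySem.List.insertBy tupLt (p.2, p.1 + 1) q) []
    solutionLoop k queue (queue.length : Int) 0 0

-- ===== PORT B =====
-- cost(T) = sum(min(t, T) for t in food_times)
def costB (food_times : List Int) (T : Int) : Int := (food_times.map (fun t => min t T)).sum

-- the `while lo < hi` binary-search loop; mid = (lo + hi + 1) // 2; the interval shrinks by at
-- least 1 per iteration, so fuel = (hi - lo).toNat (supplied at the call site) never runs out
def bsLoop (food_times : List Int) (k : Int) : Nat → Int → Int → Int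
  | 0, lo, _ => lo
  | fuel + 1, lo, hi =>
    if lo < hi then
      if costB food_times (PySem.Int.floordiv (lo + hi + 1) 2) ≤ k then
        bsLoop food_times k fuel (PySem.Int.floordiv (lo + hi + 1) 2) hi
      else
        bsLoop food_times k fuel lo (PySem.Int.floordiv (lo + hi + 1) 2 - 1)
    else lo

def solution_alt (food_times : List Int) (k : Int) : Int :=
  let n : Int := (food_times.length : Int)
  if food_times.sum ≤ k then -1
  else
    let lo := min (PySem.Int.floordiv k n) ((PySem.List.min? food_times (fun x => x)).getD 0)
    let hi := (PySem.List.max? food_times (fun x => x)).getD 0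
    let T := bsLoop food_times k ((hi - lo).toNat) lo hi
    let left := (PySem.List.enumerate food_times 1).filterMap
      (fun p => if T < p.2 then some p.1 else none)
    (PySem.List.pyGet? left (k - costB food_times T)).getD 0

-- ===== PRECONDITION & SPEC =====
-- Pre_ excludes only the empty list with k < 0, where A raises IndexError (queue[0] on an empty
-- heap) and B raises ZeroDivisionError (k // 0).
def Pre_solution (food_times : List Int) (k : Int) : Prop := food_times ≠ [] ∨ 0 ≤ k
instance (food_times : List Int) (k : Int) : Decidable (Pre_solution food_times k) := by unfold Pre_solution; infer_instance
def pvWitness_solution : List Int × Int := ([3, 1, 2], 5)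

def Spec_solution (food_times : List Int) (k : Int) (out : Int) : Prop := out = solution_alt food_times k
instance (food_times : List Int) (k : Int) (out : Int) : Decidable (Spec_solution food_times k out) := by unfold Spec_solution; infer_instance

-- ===== CLAIM (what is proved, stated in full; the proofs are below) =====
def Claim_equal_solution : Prop := ∀ (food_times : List Int) (k : Int), Dom_solution food_times k → Pre_solution food_times k → Spec_solution food_times k (solution food_times k)

-- ===== LEMMAS AND PROOFS =====

-- the (time, index) pairs A's heap holds and B's comprehension filters, time first
def fullPairs (ft : List Int) : List (Int × Int) :=
  (PySem.List.enumerate ft 1).map (fun p => (p.2, p.1))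

-- cost over pairs (first component = time)
def costP (l : List (Int × Int)) (T : Int) : Int := (l.map (fun p => min p.1 T)).sum

lemma tupLt_iff (a b : Int × Int) :
    tupLt a b = true ↔ (a.1 < b.1 ∨ (¬ b.1 < a.1 ∧ a.2 < b.2)) := by
  simp [tupLt]

lemma insertBy_perm {α : Type} (lt : α → α → Bool) (x : α) (ys : List α) :
    (PySem.List.insertBy lt x ys).Perm (x :: ys) := by
  induction ys with
  | nil => simp [PySem.List.insertBy]
  | cons y ys ih =>
    simp only [PySem.List.insertBy]
    split
    · exact List.Perm.refl _
    · exact (List.Perm.cons y ih).trans (List.Perm.swap x y ys)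

lemma insertBy_fstle (x : Int × Int) (ys : List (Int × Int))
    (h : ys.Pairwise (fun a b => a.1 ≤ b.1)) :
    (PySem.List.insertBy tupLt x ys).Pairwise (fun a b => a.1 ≤ b.1) := by
  induction ys with
  | nil => simp [PySem.List.insertBy]
  | cons y ys ih =>
    rw [List.pairwise_cons] at h
    obtain ⟨hy, hys⟩ := h
    simp only [PySem.List.insertBy]
    split
    · rename_i hlt
      have hxy : x.1 ≤ y.1 := by
        have := (tupLt_iff x y).mp hlt
        omega
      refine List.Pairwise.cons ?_ (List.Pairwise.cons hy hys)
      intro z hz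
      rcases List.mem_cons.mp hz with rfl | hz'
      · exact hxy
      · exact le_trans hxy (hy z hz')
    · rename_i hlt
      have hyx : y.1 ≤ x.1 := by
        have hn : ¬ (x.1 < y.1 ∨ (¬ y.1 < x.1 ∧ x.2 < y.2)) :=
          fun hh => hlt ((tupLt_iff x y).mpr hh)
        omega
      refine List.Pairwise.cons ?_ (ih hys)
      intro z hz
      have hz2 := (insertBy_perm tupLt x ys).mem_iff.mp hz
      rcases List.mem_cons.mp hz2 with rfl | hz'
      · exact hyx
      · exact hy z hz'

lemma foldl_insertBy_perm (l acc : List (Int × Int)) :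
    (l.foldl (fun q x => PySem.List.insertBy tupLt x q) acc).Perm (acc ++ l) := by
  induction l generalizing acc with
  | nil => simp
  | cons x l ih =>
    simp only [List.foldl_cons]
    refine (ih (PySem.List.insertBy tupLt x acc)).trans ?_
    refine (List.Perm.append_right l (insertBy_perm tupLt x acc)).trans ?_
    simpa using List.perm_middle.symm

lemma foldl_insertBy_pairwise (l acc : List (Int × Int))
    (h : acc.Pairwise (fun a b => a.1 ≤ b.1)) :
    (l.foldl (fun q x => PySem.List.insertBy tupLt x q) acc).Pairwise (fun a b => a.1 ≤ b.1) := by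
  induction l generalizing acc with
  | nil => simpa
  | cons x l ih => exact ih _ (insertBy_fstle x acc h)

-- enumerate with start s + 1 is enumerate with start s, firsts shifted
lemma enumerate_shift {α : Type} (xs : List α) (s : Int) :
    PySem.List.enumerate xs (s + 1) = (PySem.List.enumerate xs s).map (fun p => (p.1 + 1, p.2)) := by
  induction xs generalizing s with
  | nil => simp [PySem.List.enumerate_nil]
  | cons x xs ih => simp [PySem.List.enumerate_cons, ih]

lemma fullPairs_eq_map (ft : List Int) :
    fullPairs ft = (PySem.List.enumerate ft).map (fun p => (p.2, p.1 + 1)) := by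
  unfold fullPairs
  have h1 : (1 : Int) = 0 + 1 := by norm_num
  rw [h1, enumerate_shift, List.map_map]
  rfl

lemma costP_perm {l l' : List (Int × Int)} (h : l.Perm l') (T : Int) :
    costP l T = costP l' T := by
  unfold costP
  exact (h.map (fun p => min p.1 T)).sum_eq

lemma costP_append (a b : List (Int × Int)) (T : Int) :
    costP (a ++ b) T = costP a T + costP b T := by simp [costP]

lemma costP_of_le {l : List (Int × Int)} {T : Int} (h : ∀ p ∈ l, p.1 ≤ T) :
    costP l T = (l.map (fun p => p.1)).sum := by
  unfold costP
  congr 1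
  exact List.map_congr_left (fun p hp => min_eq_left (h p hp))

lemma costP_of_ge {l : List (Int × Int)} {T : Int} (h : ∀ p ∈ l, T ≤ p.1) :
    costP l T = (l.length : Int) * T := by
  induction l with
  | nil => simp [costP]
  | cons p l ih =>
    have h1 : min p.1 T = T := min_eq_right (h p (by simp))
    have h2 := ih (fun q hq => h q (by simp [hq]))
    simp only [costP, List.map_cons, List.sum_cons, List.length_cons] at h2 ⊢
    rw [h1, h2]
    push_cast
    ring

lemma costB_of_le {ft : List Int} {T : Int} (h : ∀ t ∈ ft, T ≤ t) :
    costB ft T = (ft.length : Int) * T := by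
  induction ft with
  | nil => simp [costB]
  | cons t l ih =>
    have h1 : min t T = T := min_eq_right (h t (by simp))
    have h2 := ih (fun q hq => h q (by simp [hq]))
    simp only [costB, List.map_cons, List.sum_cons, List.length_cons] at h2 ⊢
    rw [h1, h2]
    push_cast
    ring

lemma costB_of_ge {ft : List Int} {T : Int} (h : ∀ t ∈ ft, t ≤ T) :
    costB ft T = ft.sum := by
  unfold costB
  have : ft.map (fun t => min t T) = ft.map (fun t => t) :=
    List.map_congr_left (fun t ht => min_eq_left (h t ht))
  rw [this, List.map_id']

lemma costB_mono (ft : List Int) {T T' : Int} (h : T ≤ T') :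
    costB ft T ≤ costB ft T' := by
  induction ft with
  | nil => simp [costB]
  | cons t l ih =>
    simp only [costB, List.map_cons, List.sum_cons] at ih ⊢
    have := min_le_min (le_refl t) h
    linarith

lemma costB_fullPairs (ft : List Int) (T : Int) :
    costP (fullPairs ft) T = costB ft T := by
  unfold costP fullPairs costB
  rw [List.map_map]
  conv_rhs => rw [← PySem.List.map_snd_enumerate (xs := ft) (s := (1 : Int)), List.map_map]
  rfl

lemma sumFst_fullPairs (ft : List Int) :
    ((fullPairs ft).map (fun p => p.1)).sum = ft.sum := by
  unfold fullPairs
  rw [List.map_map]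
  conv_rhs => rw [← PySem.List.map_snd_enumerate (xs := ft) (s := (1 : Int))]
  rfl

lemma fullPairs_snd_lt (ft : List Int) :
    (fullPairs ft).Pairwise (fun a b => a.2 < b.2) := by
  unfold fullPairs
  rw [List.pairwise_map]
  exact PySem.List.pairwise_lt_enumerate ft 1

lemma filter_map_swap (l : List (Int × Int)) (T : Int) :
    (((l.map (fun p => (p.2, p.1))).filter (fun p => decide (T < p.1))).map (fun p => p.2))
      = l.filterMap (fun p => if T < p.2 then some p.1 else none) := by
  induction l with
  | nil => simp
  | cons p l ih =>
    simp only [List.map_cons, List.filter_cons, List.filterMap_cons]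
    by_cases h : T < p.2
    · simp [h, ih]
    · simp [h, ih]

lemma pyGet?_map {α β : Type} (f : α → β) (l : List α) (i : Int) :
    PySem.List.pyGet? (l.map f) i = (PySem.List.pyGet? l i).map f := by
  simp [PySem.List.pyGet?, PySem.List.pyIdx?]

lemma bsLoop_spec (ft : List Int) (k : Int) :
    ∀ (n : Nat) (lo hi : Int), (hi - lo).toNat ≤ n →
      costB ft lo ≤ k → (∀ T, costB ft T ≤ k → T ≤ hi) →
      costB ft (bsLoop ft k n lo hi) ≤ k ∧ ∀ T, costB ft T ≤ k → T ≤ bsLoop ft k n lo hi := by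
  intro n
  induction n with
  | zero =>
    intro lo hi hm hlo hhi
    simp only [bsLoop]
    exact ⟨hlo, fun T hT => le_trans (hhi T hT) (by omega)⟩
  | succ n ih =>
    intro lo hi hm hlo hhi
    simp only [bsLoop]
    by_cases hl : lo < hi
    · rw [if_pos hl]
      have hb := PySem.Int.floordiv_two_mid_bounds (lo := lo + 1) (hi := hi) (by omega)
      have e : lo + 1 + hi = lo + hi + 1 := by ring
      rw [e] at hb
      by_cases hc : costB ft (PySem.Int.floordiv (lo + hi + 1) 2) ≤ k
      · rw [if_pos hc]
        exact ih (PySem.Int.floordiv (lo + hi + 1) 2) hi (by omega) hc hhi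
      · rw [if_neg hc]
        refine ih lo (PySem.Int.floordiv (lo + hi + 1) 2 - 1) (by omega) hlo ?_
        intro T hT
        by_contra hTm
        push_neg at hTm
        exact hc (le_trans (costB_mono ft (by omega)) hT)
    · rw [if_neg hl]
      exact ⟨hlo, fun T hT => le_trans (hhi T hT) (by omega)⟩

-- A's while loop, characterized: it lands on the maximal level T with cost(T) ≤ k and returns the
-- ((k - cost(T))-th remaining food, the remaining foods being exactly those with t > T
lemma loopA (k : Int) (full : List (Int × Int)) (hne : full ≠ [])
    (hk : k < ((full.map (fun p => p.1)).sum))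
    (hsnd : full.Pairwise (fun a b => a.2 < b.2)) :
    ∀ (q pop : List (Int × Int)) (before : Int),
      (pop ++ q).Perm full →
      q.Pairwise (fun a b => a.1 ≤ b.1) →
      ((pop = [] ∧ before = 0) ∨
        ((∀ p ∈ pop, p.1 ≤ before) ∧ (∀ p ∈ q, before ≤ p.1) ∧
          (pop.map (fun p => p.1)).sum + (q.length : Int) * before ≤ k)) →
      ∃ T, costP full T ≤ k ∧ k < costP full (T + 1) ∧
        solutionLoop k q (q.length : Int)
            ((pop.map (fun p => p.1)).sum + (q.length : Int) * before) before
          = ((PySem.List.pyGet? (full.filter (fun p => decide (T < p.1)))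
                (k - costP full T)).map (fun p => p.2)).getD 0 := by
  intro q
  induction q with
  | nil =>
    intro pop before hperm _ hinv
    exfalso
    rw [List.append_nil] at hperm
    rcases hinv with ⟨rfl, _⟩ | ⟨_, _, hek⟩
    · exact hne hperm.symm.eq_nil
    · have hsum := (hperm.map (fun p => p.1)).sum_eq
      simp only [List.length_nil, Nat.cast_zero, zero_mul, add_zero] at hek
      omega
  | cons hd rest ih =>
    obtain ⟨t, i⟩ := hd
    intro pop before hperm hsort hinv
    have hm : (0 : Int) < (((t, i) :: rest).length : Int) := by
      simp only [List.length_cons]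
      push_cast
      omega
    simp only [solutionLoop]
    by_cases hc : (pop.map (fun p => p.1)).sum + ((((t, i) :: rest).length : Int)) * before
        + (((t, i) :: rest).length : Int) * (t - before) ≤ k
    · rw [if_pos hc]
      have hlen : ((((t, i) :: rest).length : Int)) - 1 = (rest.length : Int) := by
        simp only [List.length_cons]; push_cast; ring
      have hpop' : (pop.map (fun p => p.1)).sum + ((((t, i) :: rest).length : Int)) * before
            + (((t, i) :: rest).length : Int) * (t - before)
          = ((pop ++ [(t, i)]).map (fun p => p.1)).sum + (rest.length : Int) * t := by
        simp only [List.map_append, List.sum_append, List.map_cons, List.map_nil,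
          List.sum_cons, List.sum_nil, List.length_cons]
        push_cast
        ring
      rw [hlen, hpop']
      apply ih (pop ++ [(t, i)]) t
      · simpa [List.append_assoc] using hperm
      · exact (List.pairwise_cons.mp hsort).2
      · right
        refine ⟨?_, (List.pairwise_cons.mp hsort).1, ?_⟩
        · intro p hp
          rcases List.mem_append.mp hp with hp' | hp'
          · rcases hinv with ⟨rfl, _⟩ | ⟨hple, hqge, _⟩
            · simp at hp'
            · exact le_trans (hple p hp') (hqge (t, i) (by simp))
          · simp at hp'
            subst hp'
            exact le_refl _
        · rw [← hpop']
          exact hc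
    · rw [if_neg hc]
      push_neg at hc
      set m : Int := (((t, i) :: rest).length : Int) with hmdef
      set elapsed : Int := (pop.map (fun p => p.1)).sum + m * before with helapsed
      set T : Int := before + PySem.Int.floordiv (k - elapsed) m with hTdef
      have hfd := PySem.Int.floordiv_mul_add_mod (k - elapsed) m
      have hmod0 := PySem.Int.mod_nonneg (k - elapsed) hm
      have hmodlt := PySem.Int.mod_lt (k - elapsed) hm
      have hTt : T < t := by
        have h1 : k - elapsed < (t - before) * m := by
          have := mul_comm m (t - before)
          omega
        have h2 := (PySem.Int.floordiv_lt_iff_lt_mul (a := k - elapsed) (b := m)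
          (q := t - before) hm).mpr h1
        omega
      have hq : ∀ p ∈ (t, i) :: rest, T < p.1 := by
        intro p hp
        rcases List.mem_cons.mp hp with rfl | hp'
        · exact hTt
        · exact lt_of_lt_of_le hTt ((List.pairwise_cons.mp hsort).1 p hp')
      have hpopT : ∀ p ∈ pop, p.1 ≤ T := by
        rcases hinv with ⟨rfl, _⟩ | ⟨hple, hqge, hek⟩
        · intro p hp; simp at hp
        · intro p hp
          have h0 : 0 ≤ PySem.Int.floordiv (k - elapsed) m :=
            (PySem.Int.le_floordiv_iff_mul_le (a := k - elapsed) (b := m)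
              (q := 0) hm).mpr (by omega)
          exact le_trans (hple p hp) (by omega)
      have hsplit : costP full T = (pop.map (fun p => p.1)).sum + m * T := by
        rw [costP_perm hperm.symm T, costP_append, costP_of_le hpopT,
          costP_of_ge (fun p hp => le_of_lt (hq p hp))]
      have hsplit1 : costP full (T + 1) = (pop.map (fun p => p.1)).sum + m * (T + 1) := by
        rw [costP_perm hperm.symm _, costP_append,
          costP_of_le (fun p hp => le_trans (hpopT p hp) (by omega)),
          costP_of_ge (fun p hp => by have := hq p hp; omega)]
      have hcomm : m * T = m * before + PySem.Int.floordiv (k - elapsed) m * m := by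
        rw [hTdef]; ring
      have hcomm1 : m * (T + 1) = m * before + PySem.Int.floordiv (k - elapsed) m * m + m := by
        rw [hTdef]; ring
      have hfeas : costP full T ≤ k := by rw [hsplit]; omega
      have hfeas1 : k < costP full (T + 1) := by rw [hsplit1]; omega
      have hidx : k - costP full T = PySem.Int.mod (k - elapsed) m := by
        rw [hsplit]; omega
      have hfilt : PySem.List.sorted ((t, i) :: rest) (fun p => p.2)
          = full.filter (fun p => decide (T < p.1)) := by
        apply PySem.List.sorted_eq_of_perm_of_pairwise_lt
        · have h1 : (full.filter (fun p => decide (T < p.1))).Perm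
              ((pop ++ (t, i) :: rest).filter (fun p => decide (T < p.1))) :=
            hperm.symm.filter _
          rw [List.filter_append] at h1
          have h2 : pop.filter (fun p => decide (T < p.1)) = [] :=
            List.filter_eq_nil_iff.mpr (fun p hp => by simpa using not_lt.mpr (hpopT p hp))
          have h3 : ((t, i) :: rest).filter (fun p => decide (T < p.1)) = (t, i) :: rest :=
            List.filter_eq_self.mpr (fun p hp => by simpa using hq p hp)
          rw [h2, h3] at h1
          simpa using h1
        · exact hsnd.filter _
      refine ⟨T, hfeas, hfeas1, ?_⟩
      rw [hfilt, hidx]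

-- ===== VERDICT (by name: the statement is the Claim_ definition above) =====
theorem solution_spec : Claim_equal_solution := by
  unfold Claim_equal_solution
  intro ft k _ hpre
  unfold Spec_solution
  by_cases hsum : ft.sum ≤ k
  · simp [solution, solution_alt, hsum]
  · have hft : ft ≠ [] := by
      intro h
      subst h
      simp only [List.sum_nil] at hsum
      rcases hpre with h | h
      · exact h rfl
      · omega
    have hq1 : ((PySem.List.enumerate ft).foldl
        (fun q p => PySem.List.insertBy tupLt (p.2, p.1 + 1) q) []).Perm (fullPairs ft) := by
      have h := foldl_insertBy_perm (fullPairs ft) []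
      rw [fullPairs_eq_map, List.foldl_map] at h
      simpa [← fullPairs_eq_map] using h
    have hq2 : ((PySem.List.enumerate ft).foldl
        (fun q p => PySem.List.insertBy tupLt (p.2, p.1 + 1) q) []).Pairwise
          (fun a b => a.1 ≤ b.1) := by
      have h := foldl_insertBy_pairwise (fullPairs ft) [] (by simp)
      rw [fullPairs_eq_map, List.foldl_map] at h
      exact h
    have hlenfp : (fullPairs ft).length = ft.length := by
      unfold fullPairs
      simp [PySem.List.length_enumerate]
    have hfne : fullPairs ft ≠ [] := by
      intro h
      apply hft
      have := congrArg List.length h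
      rw [hlenfp] at this
      exact List.eq_nil_of_length_eq_zero this
    have hksum : k < ((fullPairs ft).map (fun p => p.1)).sum := by
      rw [sumFst_fullPairs]
      omega
    obtain ⟨TA, hA1, hA2, hAeq⟩ := loopA k (fullPairs ft) hfne hksum (fullPairs_snd_lt ft)
      ((PySem.List.enumerate ft).foldl (fun q p => PySem.List.insertBy tupLt (p.2, p.1 + 1) q) [])
      [] 0 (by simpa using hq1) hq2 (Or.inl ⟨rfl, rfl⟩)
    simp only [List.map_nil, List.sum_nil, mul_zero, zero_add, add_zero] at hAeq
    -- B-side values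
    have hn : (0 : Int) < (ft.length : Int) := by
      have := List.length_pos_iff.mpr hft
      push_cast
      omega
    obtain ⟨mn, hmn⟩ : ∃ mn, PySem.List.min? ft (fun x => x) = some mn := by
      cases h : PySem.List.min? ft (fun x => x) with
      | none => exact absurd ((PySem.List.min?_eq_none_iff ft (fun x => x)).mp h) hft
      | some mn => exact ⟨mn, rfl⟩
    obtain ⟨mx, hmx⟩ : ∃ mx, PySem.List.max? ft (fun x => x) = some mx := by
      cases h : PySem.List.max? ft (fun x => x) with
      | none => exact absurd ((PySem.List.max?_eq_none_iff ft (fun x => x)).mp h) hft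
      | some mx => exact ⟨mx, rfl⟩
    have hlo : costB ft (min (PySem.Int.floordiv k (ft.length : Int)) mn) ≤ k := by
      have hminall : ∀ t ∈ ft, min (PySem.Int.floordiv k (ft.length : Int)) mn ≤ t :=
        fun t ht => le_trans (min_le_right _ _) (PySem.List.min?_isMin hmn t ht)
      rw [costB_of_le hminall]
      have h1 : (ft.length : Int) * min (PySem.Int.floordiv k (ft.length : Int)) mn
          ≤ (ft.length : Int) * PySem.Int.floordiv k (ft.length : Int) :=
        mul_le_mul_of_nonneg_left (min_le_left _ _) (by omega)
      have h2 := PySem.Int.floordiv_mul_add_mod k (ft.length : Int)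
      have h3 := PySem.Int.mod_nonneg k hn
      have h4 := mul_comm (ft.length : Int) (PySem.Int.floordiv k (ft.length : Int))
      omega
    have hub : ∀ T, costB ft T ≤ k → T ≤ mx := by
      intro T hT
      by_contra hgt
      push_neg at hgt
      have hall : ∀ t ∈ ft, t ≤ T :=
        fun t ht => le_trans (PySem.List.max?_isMax hmx t ht) (by omega)
      rw [costB_of_ge hall] at hT
      omega
    obtain ⟨hB1, hBmax⟩ := bsLoop_spec ft k
      ((mx - min (PySem.Int.floordiv k (ft.length : Int)) mn).toNat)
      (min (PySem.Int.floordiv k (ft.length : Int)) mn) mx le_rfl hlo hub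
    have hB2 : k < costB ft (bsLoop ft k
        ((mx - min (PySem.Int.floordiv k (ft.length : Int)) mn).toNat)
        (min (PySem.Int.floordiv k (ft.length : Int)) mn) mx + 1) := by
      by_contra hle
      push_neg at hle
      have := hBmax _ hle
      omega
    have hTeq : TA = bsLoop ft k
        ((mx - min (PySem.Int.floordiv k (ft.length : Int)) mn).toNat)
        (min (PySem.Int.floordiv k (ft.length : Int)) mn) mx := by
      set TB := bsLoop ft k
        ((mx - min (PySem.Int.floordiv k (ft.length : Int)) mn).toNat)
        (min (PySem.Int.floordiv k (ft.length : Int)) mn) mx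
      have e1 := costB_fullPairs ft TA
      have e2 := costB_fullPairs ft (TA + 1)
      rcases lt_trichotomy TA TB with h | h | h
      · have hmono := costB_mono ft (show TA + 1 ≤ TB by omega)
        omega
      · exact h
      · have hmono := costB_mono ft (show TB + 1 ≤ TA by omega)
        omega
    -- assemble
    simp only [solution, solution_alt, if_neg hsum]
    rw [hAeq, hTeq, hmn, hmx, Option.getD_some, Option.getD_some, costB_fullPairs,
      ← pyGet?_map,
      show fullPairs ft = (PySem.List.enumerate ft 1).map (fun p => (p.2, p.1)) from rfl,
      filter_map_swap]
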